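-- pv_equiv track=rewrite | github.com/myo-05/Codingtest | 프로그래머스/0/181829. 이차원 배열 대각선 순회하기/이차원 배열 대각선 순회하기.py | solution
-- ===== SOURCE A (Python) =====
-- def solution(board, k):
--     answer = 0
--     row,col = len(board),len(board[0])
--     for i in range(row):
--         for j in range(col):
--             if i+j <= k:
--                 answer += board[i][j]
--     return answer
-- ===== SOURCE B (Python) =====
-- def solution(board, k):
--     row, col = len(board), len(board[0])
--     answer = 0
--     for d in range(min(k, row + col - 2) + 1):
--         for i in range(max(0, d - col + 1), min(d, row - 1) + 1):
--             answer += board[i][d - i]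
--     return answer
-- ===== Notes on version B (the rewrite author's own statement) =====
-- stated objective: alternative
-- what changed: Replaces A's row-major scan over all row*col cells with an if-filter by an anti-diagonal traversal (d = i+j from 0 to min(k, row+col-2)) whose inner loop bounds touch only the qualifying cells via j = d-i.
import Mathlib
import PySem

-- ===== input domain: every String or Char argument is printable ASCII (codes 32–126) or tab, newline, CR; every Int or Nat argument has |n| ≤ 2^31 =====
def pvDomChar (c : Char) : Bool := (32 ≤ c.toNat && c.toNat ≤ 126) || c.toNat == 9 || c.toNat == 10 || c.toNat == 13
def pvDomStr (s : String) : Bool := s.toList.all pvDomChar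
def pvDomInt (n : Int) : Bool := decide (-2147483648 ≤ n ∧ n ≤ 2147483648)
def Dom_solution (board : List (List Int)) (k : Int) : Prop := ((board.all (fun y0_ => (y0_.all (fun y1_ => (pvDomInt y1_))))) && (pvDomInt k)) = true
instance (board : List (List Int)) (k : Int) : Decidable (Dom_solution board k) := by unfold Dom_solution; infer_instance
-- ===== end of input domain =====

-- B replaces A's row-major scan-and-filter with an anti-diagonal traversal (d = i+j) that
-- visits only the qualifying cells via index arithmetic; objective: alternative decomposition.

-- ===== PORT A =====
def solution (board : List (List Int)) (k : Int) : Int :=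
  let row : Int := board.length
  let col : Int := (PySem.List.pyGetD board 0 []).length
  (PySem.List.pyRange 0 row 1).foldl (fun answer i =>
    (PySem.List.pyRange 0 col 1).foldl (fun answer j =>
      if i + j ≤ k then answer + PySem.List.pyGetD (PySem.List.pyGetD board i []) j 0
      else answer) answer) 0

-- ===== PORT B =====
def solution_alt (board : List (List Int)) (k : Int) : Int :=
  let row : Int := board.length
  let col : Int := (PySem.List.pyGetD board 0 []).length
  (PySem.List.pyRange 0 (min k (row + col - 2) + 1) 1).foldl (fun answer d =>
    (PySem.List.pyRange (max 0 (d - col + 1)) (min d (row - 1) + 1) 1).foldl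
      (fun answer i => answer + PySem.List.pyGetD (PySem.List.pyGetD board i []) (d - i) 0)
      answer) 0

-- ===== PRECONDITION & SPEC =====
-- Pre_ excludes exactly the inputs where Python A raises: the empty board (len(board[0]) is an
-- IndexError) and ragged boards where some accessed cell board[i][j] (i+j ≤ k, j < len(board[0]))
-- is missing; Python B raises on the same inputs.
def Pre_solution (board : List (List Int)) (k : Int) : Prop :=
  board ≠ [] ∧ ∀ p ∈ board.zipIdx, ∀ j < (board.headD []).length,
    ((p.2 : Int) + (j : Int) ≤ k → j < p.1.length)
instance (board : List (List Int)) (k : Int) : Decidable (Pre_solution board k) := by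
  unfold Pre_solution; infer_instance
def pvWitness_solution : List (List Int) × Int := ([[1, 2], [3, 4]], 1)
def Spec_solution (board : List (List Int)) (k : Int) (out : Int) : Prop := out = solution_alt board k
instance (board : List (List Int)) (k : Int) (out : Int) : Decidable (Spec_solution board k out) := by unfold Spec_solution; infer_instance

-- ===== CLAIM (what is proved, stated in full; the proofs are below) =====
def Claim_equal_solution : Prop := ∀ (board : List (List Int)) (k : Int), Dom_solution board k → Pre_solution board k → Spec_solution board k (solution board k)

-- ===== LEMMAS AND PROOFS =====

-- a loop body 'if c then acc + v else acc' is 'acc + (if c then v else 0)'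
lemma foldl_ite_add (l : List Int) (c : Int → Prop) [DecidablePred c] (v : Int → Int) (a : Int) :
    l.foldl (fun acc x => if c x then acc + v x else acc) a
      = l.foldl (fun acc x => acc + (if c x then v x else 0)) a := by
  have : (fun (acc x : Int) => if c x then acc + v x else acc)
      = fun acc x => acc + (if c x then v x else 0) := by
    funext acc x; split_ifs <;> simp
  rw [this]

-- sum of g over list(range(a,b)) equals the Finset.Ico sum
lemma sum_pyRange (g : Int → Int) (a b : Int) :
    ((PySem.List.pyRange a b 1).map g).sum = ∑ i ∈ Finset.Ico a b, g i := by
  obtain ⟨n, hn⟩ : ∃ n : ℕ, (b - a).toNat = n := ⟨_, rfl⟩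
  induction n generalizing a with
  | zero =>
    have hba : b ≤ a := by omega
    rw [PySem.List.pyRange_one_eq_nil hba, Finset.Ico_eq_empty (by omega)]
    simp
  | succ n ih =>
    have hab : a < b := by omega
    have hset : Finset.Ico a b = insert a (Finset.Ico (a + 1) b) := by
      ext x; simp [Finset.mem_Ico, Finset.mem_insert]; omega
    rw [PySem.List.pyRange_one_cons hab, hset,
        Finset.sum_insert (by simp [Finset.mem_Ico])]
    simp only [List.map_cons, List.sum_cons]
    rw [ih (a + 1) (by omega)]

-- the diagonal reindexing (i, j) ↦ ⟨i + j, i⟩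
lemma diag_reindex (F : Int → Int → Int) (row col k : Int) :
    ∑ p ∈ (Finset.Ico (0:Int) row ×ˢ Finset.Ico (0:Int) col).filter (fun p => p.1 + p.2 ≤ k),
      F p.1 p.2
    = ∑ q ∈ (Finset.Ico (0:Int) (min k (row + col - 2) + 1)).sigma
          (fun d => Finset.Ico (max 0 (d - col + 1)) (min d (row - 1) + 1)),
        F q.2 (q.1 - q.2) := by
  refine Finset.sum_nbij' (fun p => ⟨p.1 + p.2, p.1⟩) (fun q => (q.2, q.1 - q.2)) ?_ ?_ ?_ ?_ ?_
  · intro p hp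
    simp only [Finset.mem_filter, Finset.mem_product, Finset.mem_Ico] at hp
    simp only [Finset.mem_sigma, Finset.mem_Ico]
    omega
  · intro q hq
    simp only [Finset.mem_sigma, Finset.mem_Ico] at hq
    simp only [Finset.mem_filter, Finset.mem_product, Finset.mem_Ico]
    omega
  · intro p _; simp
  · intro q _; simp
  · intro p _; simp

lemma sums_eq (F : Int → Int → Int) (row col k : Int) :
    ∑ i ∈ Finset.Ico (0:Int) row, ∑ j ∈ Finset.Ico (0:Int) col,
      (if i + j ≤ k then F i j else 0)
    = ∑ d ∈ Finset.Ico (0:Int) (min k (row + col - 2) + 1),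
        ∑ i ∈ Finset.Ico (max 0 (d - col + 1)) (min d (row - 1) + 1), F i (d - i) := by
  rw [← Finset.sum_product', ← Finset.sum_filter, diag_reindex F row col k,
      Finset.sum_sigma]

-- ===== VERDICT (by name: the statement is the Claim_ definition above) =====
theorem solution_spec : Claim_equal_solution := by
  intro board k _ _
  unfold Spec_solution solution solution_alt
  simp only []
  set F : Int → Int → Int :=
    fun i j => PySem.List.pyGetD (PySem.List.pyGetD board i []) j 0 with hF
  set row : Int := (board.length : Int)
  set col : Int := ((PySem.List.pyGetD board 0 []).length : Int)
  -- turn both double foldls into double sums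
  rw [show (fun (answer i : Int) =>
        (PySem.List.pyRange 0 col 1).foldl (fun answer j =>
          if i + j ≤ k then answer + F i j else answer) answer)
      = fun answer i => answer +
          ((PySem.List.pyRange 0 col 1).map (fun j => if i + j ≤ k then F i j else 0)).sum from by
    funext answer i
    rw [foldl_ite_add _ (fun j => i + j ≤ k) (fun j => F i j) answer,
        PySem.List.foldl_add]]
  rw [PySem.List.foldl_add]
  rw [show (fun (answer d : Int) =>
        (PySem.List.pyRange (max 0 (d - col + 1)) (min d (row - 1) + 1) 1).foldl
          (fun answer i => answer + F i (d - i)) answer)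
      = fun answer d => answer +
          ((PySem.List.pyRange (max 0 (d - col + 1)) (min d (row - 1) + 1) 1).map
            (fun i => F i (d - i))).sum from by
    funext answer d; rw [PySem.List.foldl_add]]
  rw [PySem.List.foldl_add]
  simp only [zero_add]
  rw [sum_pyRange, sum_pyRange]
  calc ∑ i ∈ Finset.Ico (0:Int) row,
          ((PySem.List.pyRange 0 col 1).map (fun j => if i + j ≤ k then F i j else 0)).sum
      = ∑ i ∈ Finset.Ico (0:Int) row, ∑ j ∈ Finset.Ico (0:Int) col,
          (if i + j ≤ k then F i j else 0) := by
        refine Finset.sum_congr rfl fun i _ => ?_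
        exact sum_pyRange _ 0 col
    _ = ∑ d ∈ Finset.Ico (0:Int) (min k (row + col - 2) + 1),
          ∑ i ∈ Finset.Ico (max 0 (d - col + 1)) (min d (row - 1) + 1), F i (d - i) :=
        sums_eq F row col k
    _ = ∑ d ∈ Finset.Ico (0:Int) (min k (row + col - 2) + 1),
          ((PySem.List.pyRange (max 0 (d - col + 1)) (min d (row - 1) + 1) 1).map
            (fun i => F i (d - i))).sum := by
        refine Finset.sum_congr rfl fun d _ => ?_
        exact (sum_pyRange _ _ _).symm
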